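-- pv_equiv track=rewrite | github.com/Jalco28/Advent-of-Code | 2019/Day4.py | check
-- ===== SOURCE A (Python) =====
-- from itertools import pairwise
--
-- def check(num):
--     found_same = False
--     for a, b in pairwise(str(num)):
--         a = int(a)
--         b = int(b)
--         if b < a:
--             return False
--         if b == a:
--             found_same = True
--     return found_same
-- ===== SOURCE B (Python) =====
-- def check(num):
--     digits = [int(c) for c in str(num)]
--     return digits == sorted(digits) and any(x == y for x, y in zip(digits, digits[1:]))
-- ===== Notes on version B (the rewrite author's own statement) =====
-- stated objective: simpler
-- what changed: Replaces A's early-exit pairwise scan carrying a found_same flag with a declarative sort-and-compare (digits == sorted(digits)) plus a zip-based adjacent-duplicate test; equal cost at these sizes, no speed claim.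
import Mathlib
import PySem

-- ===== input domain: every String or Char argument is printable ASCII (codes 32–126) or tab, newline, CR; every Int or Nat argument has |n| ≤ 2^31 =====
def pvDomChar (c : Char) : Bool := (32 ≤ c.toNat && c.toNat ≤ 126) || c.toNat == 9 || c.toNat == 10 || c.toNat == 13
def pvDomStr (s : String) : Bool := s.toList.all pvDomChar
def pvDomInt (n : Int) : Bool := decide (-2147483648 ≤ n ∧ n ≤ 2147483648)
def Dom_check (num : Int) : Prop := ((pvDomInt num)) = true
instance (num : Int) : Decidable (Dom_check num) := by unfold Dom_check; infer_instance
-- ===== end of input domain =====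

-- B replaces A's early-exit pairwise scan with a sort-and-compare plus an adjacent-duplicate zip test (simpler, no speed claim).


-- ===== PORT A =====
-- int(c) for a single character: exact on digit characters; Pre_check excludes
-- negative num, the only inputs whose str contains a non-digit ('-'), where Python raises ValueError.
def pvDigit (c : Char) : Int := (c.toNat : Int) - 48

-- the for-loop over pairwise(str(num)) with early return False and the found_same flag
def checkLoop : List Char → Bool → Bool
  | a :: b :: rest, found =>
    if pvDigit b < pvDigit a then false
    else checkLoop (b :: rest) (if pvDigit b == pvDigit a then true else found)
  | _, found => found

def check (num : Int) : Bool := checkLoop (PySem.Int.toChars num) false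

-- ===== PORT B =====
def anyAdjEq (ds : List Int) : Bool := (ds.zip ds.tail).any (fun p => p.1 == p.2)

def check_alt (num : Int) : Bool :=
  let digits := (PySem.Int.toChars num).map pvDigit
  decide (digits = PySem.List.sorted digits (fun x => x) false) && anyAdjEq digits

-- ===== PRECONDITION & SPEC =====
-- Pre_check excludes exactly negative num, on which both A and B raise ValueError (int('-')).
def Pre_check (num : Int) : Prop := 0 ≤ num
instance (num : Int) : Decidable (Pre_check num) := by unfold Pre_check; infer_instance
def pvWitness_check : Int := (122345)
def Spec_check (num : Int) (out : Bool) : Prop := out = check_alt num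
instance (num : Int) (out : Bool) : Decidable (Spec_check num out) := by unfold Spec_check; infer_instance

-- ===== CLAIM (what is proved, stated in full; the proofs are below) =====
def Claim_equal_check : Prop := ∀ (num : Int), Dom_check num → Pre_check num → Spec_check num (check num)

-- ===== LEMMAS AND PROOFS =====

-- boolean non-decreasing check, the shape A's scan enforces
def nondec : List Int → Bool
  | a :: b :: t => decide (a ≤ b) && nondec (b :: t)
  | _ => true

-- boolean adjacent-equal check, the shape matching A's scan
def anyAdj : List Int → Bool
  | a :: b :: t => (a == b) || anyAdj (b :: t)
  | _ => false

lemma checkLoop_eq (cs : List Char) :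
    ∀ found, checkLoop cs found =
      (nondec (cs.map pvDigit) && (found || anyAdj (cs.map pvDigit))) := by
  induction cs with
  | nil => intro found; simp [checkLoop, nondec, anyAdj]
  | cons a t ih =>
    cases t with
    | nil => intro found; simp [checkLoop, nondec, anyAdj]
    | cons b r =>
      intro found
      simp only [checkLoop, List.map]
      by_cases hlt : pvDigit b < pvDigit a
      · simp [hlt, nondec, show ¬ (pvDigit a ≤ pvDigit b) by omega]
      · rw [if_neg hlt, ih]
        have hle : pvDigit a ≤ pvDigit b := by omega
        by_cases heq : pvDigit b = pvDigit a
        · simp [heq, nondec, anyAdj]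
        · have hne : ¬ (pvDigit a = pvDigit b) := fun h => heq h.symm
          simp [nondec, anyAdj, hle, heq, beq_eq_false_iff_ne.mpr hne]

lemma anyAdj_eq_zip (ds : List Int) : anyAdj ds = anyAdjEq ds := by
  induction ds with
  | nil => simp [anyAdj, anyAdjEq]
  | cons a t ih =>
    cases t with
    | nil => simp [anyAdj, anyAdjEq]
    | cons b r => simp [anyAdj, anyAdjEq] at ih ⊢; rw [ih]

lemma nondec_iff_chain (ds : List Int) : nondec ds = true ↔ List.IsChain (· ≤ ·) ds := by
  induction ds with
  | nil => simp [nondec]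
  | cons a t ih =>
    cases t with
    | nil => simp [nondec]
    | cons b r =>
      simp only [nondec, Bool.and_eq_true, decide_eq_true_eq, List.isChain_cons_cons] at ih ⊢
      rw [ih]

lemma nondec_iff_sorted (ds : List Int) :
    nondec ds = true ↔ ds = PySem.List.sorted ds (fun x => x) false := by
  rw [nondec_iff_chain, List.isChain_iff_pairwise]
  constructor
  · intro h
    exact (PySem.List.sorted_eq_self_of_pairwise ds (fun x => x) h).symm
  · intro h
    have := PySem.List.sorted_pairwise ds (fun x : Int => x)
    rw [← h] at this
    exact this

-- ===== VERDICT (by name: the statement is the Claim_ definition above) =====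
lemma nondec_eq_decide (ds : List Int) :
    nondec ds = decide (ds = PySem.List.sorted ds (fun x => x) false) := by
  by_cases h : ds = PySem.List.sorted ds (fun x => x) false
  · rw [(nondec_iff_sorted ds).mpr h, decide_eq_true h]
  · have hn : nondec ds ≠ true := fun hc => h ((nondec_iff_sorted ds).mp hc)
    rw [Bool.eq_false_iff.mpr hn, decide_eq_false h]

theorem check_spec : Claim_equal_check := by
  intro num _ _
  unfold Spec_check check check_alt
  rw [checkLoop_eq, anyAdj_eq_zip, nondec_eq_decide]
  simp only [Bool.false_or]
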